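-- pv_equiv track=rewrite | github.com/matthewdo823-ui/UCLA_course_planner_agent | course_planner/agents/schedule_agent.py | _blocks_conflict
-- ===== SOURCE A (Python) =====
-- def _blocks_conflict(
--     a: list[tuple[str, int, int]],
--     b: list[tuple[str, int, int]],
-- ) -> bool:
--     for d1, s1, e1 in a:
--         for d2, s2, e2 in b:
--             if d1 == d2 and s1 < e2 and s2 < e1:
--                 return True
--     return False
-- ===== SOURCE B (Python) =====
-- def _blocks_conflict(
--     a: list[tuple[str, int, int]],
--     b: list[tuple[str, int, int]],
-- ) -> bool:
--     by_day: dict[str, list[tuple[int, int]]] = {}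
--     for d, s, e in b:
--         by_day.setdefault(d, []).append((s, e))
--     for d, s1, e1 in a:
--         for s2, e2 in by_day.get(d, ()):
--             if s1 < e2 and s2 < e1:
--                 return True
--     return False
-- ===== Notes on version B (the rewrite author's own statement) =====
-- stated objective: faster
-- what changed: B indexes b's intervals by day in a dict in one pass, then checks each block of a only against the bucket for its own day, instead of comparing every pair of blocks.
import Mathlib
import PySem

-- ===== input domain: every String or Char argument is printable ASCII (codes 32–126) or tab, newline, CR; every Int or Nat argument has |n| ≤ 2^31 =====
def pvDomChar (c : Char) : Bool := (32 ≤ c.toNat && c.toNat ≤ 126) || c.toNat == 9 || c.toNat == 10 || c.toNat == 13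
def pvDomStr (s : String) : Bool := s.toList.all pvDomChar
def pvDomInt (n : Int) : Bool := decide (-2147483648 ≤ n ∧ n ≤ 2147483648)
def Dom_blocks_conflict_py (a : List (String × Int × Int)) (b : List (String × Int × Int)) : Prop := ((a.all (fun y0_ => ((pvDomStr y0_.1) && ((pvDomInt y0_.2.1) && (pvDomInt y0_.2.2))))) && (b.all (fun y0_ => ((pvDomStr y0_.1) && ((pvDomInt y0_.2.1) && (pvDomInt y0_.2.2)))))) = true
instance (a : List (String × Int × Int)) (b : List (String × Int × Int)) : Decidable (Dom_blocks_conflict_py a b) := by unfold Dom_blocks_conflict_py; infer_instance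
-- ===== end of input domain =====

-- B replaces A's all-pairs scan by a one-pass day-indexed dict of b's intervals,
-- then checks each block of a only against its own day's bucket (objective: faster).

-- ===== PORT A =====
-- nested for-loops with early 'return True' = nested List.any
def blocks_conflict_py (a : List (String × Int × Int)) (b : List (String × Int × Int)) : Bool :=
  a.any (fun p =>
    b.any (fun q =>
      p.1 == q.1 && decide (p.2.1 < q.2.2) && decide (q.2.1 < p.2.2)))

-- ===== PORT B =====
-- by_day.setdefault(d, []).append((s, e))  =  modify d [] (· ++ [(s, e)])
def blocks_conflict_py_alt (a : List (String × Int × Int)) (b : List (String × Int × Int)) : Bool :=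
  let by_day : PySem.Dict String (List (Int × Int)) :=
    b.foldl (fun d p => d.modify p.1 [] (· ++ [p.2])) PySem.Dict.empty
  a.any (fun p =>
    (by_day.getD p.1 []).any (fun q =>
      decide (p.2.1 < q.2) && decide (q.1 < p.2.2)))

-- ===== PRECONDITION & SPEC =====
def Spec_blocks_conflict_py (a : List (String × Int × Int)) (b : List (String × Int × Int)) (out : Bool) : Prop := out = blocks_conflict_py_alt a b
instance (a : List (String × Int × Int)) (b : List (String × Int × Int)) (out : Bool) : Decidable (Spec_blocks_conflict_py a b out) := by unfold Spec_blocks_conflict_py; infer_instance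

-- ===== CLAIM (what is proved, stated in full; the proofs are below) =====
def Claim_equal_blocks_conflict_py : Prop := ∀ (a : List (String × Int × Int)) (b : List (String × Int × Int)), Dom_blocks_conflict_py a b → Spec_blocks_conflict_py a b (blocks_conflict_py a b)

-- ===== LEMMAS AND PROOFS =====

-- For each block p of a, B's bucket lookup scans exactly b's blocks of p's day.
theorem pv_bucket_getD (b : List (String × Int × Int)) (c : String) :
    ((b.foldl (fun d p => d.modify p.1 [] (· ++ [p.2])) PySem.Dict.empty).getD c [])
      = (b.filter (fun p => p.1 == c)).map (·.2) := by
  rw [PySem.Dict.getD_foldl_modify_append]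
  rfl

theorem pv_inner_any (b : List (String × Int × Int)) (p : String × Int × Int) :
    (((b.foldl (fun d q => d.modify q.1 [] (· ++ [q.2])) PySem.Dict.empty).getD p.1 []).any
        (fun q => decide (p.2.1 < q.2) && decide (q.1 < p.2.2)))
      = b.any (fun q => p.1 == q.1 && decide (p.2.1 < q.2.2) && decide (q.2.1 < p.2.2)) := by
  rw [pv_bucket_getD, List.any_map]
  refine Bool.eq_iff_iff.mpr ?_
  simp only [List.any_eq_true, List.mem_filter, Function.comp]
  simp only [Bool.and_eq_true, beq_iff_eq, decide_eq_true_eq]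
  constructor
  · rintro ⟨q, ⟨hq, hd⟩, h1, h2⟩; exact ⟨q, hq, ⟨hd.symm, h1⟩, h2⟩
  · rintro ⟨q, hq, ⟨hd, h1⟩, h2⟩; exact ⟨q, ⟨hq, hd.symm⟩, h1, h2⟩

-- ===== VERDICT (by name: the statement is the Claim_ definition above) =====
theorem blocks_conflict_py_spec : Claim_equal_blocks_conflict_py := by
  intro a b _
  unfold Spec_blocks_conflict_py blocks_conflict_py blocks_conflict_py_alt
  congr 1
  funext p
  exact (pv_inner_any b p).symm
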